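-- pv_equiv track=rewrite | github.com/PremusL/IS1 | r.py | parse_equation1
-- ===== SOURCE A (Python) =====
-- def parse_equation1(string):
--     tokens = []
--     no_white = string.replace(" ","")
--     another = no_white.replace("**", "^")
--     another = another.replace("sin", "s")
--     another = another.replace("cos", "c")
--     another = another.replace("log", "l")
--
--     #simplify
--     another = another.replace("^1","")
--     another = another.replace("/1","")
--     another = another.replace("*1","")
--
--     for c in another:
--         tokens.append(c)
--
--     start = 0
--     tokens2 = []
--     operand = False
--
--     if (tokens[0] == '-'):
--         tokens2.append(str(int(tokens[1])*-1))
--         operand = True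
--
--
--     if operand:
--
--
--         operand = False
--         start = 2
--
--     else:
--         start = 0
--
--
--     for i in range(start, len(tokens)):
--
--         if i > 1 and tokens[i-1] in "*^-+/" and (tokens[i] == "-" or tokens[i] == "+"):
--             if tokens[i] == "-":
--                 operand = True
--
--         else:
--             if tokens[i].isnumeric():
--                 t = int(tokens[i])
--                 if operand:
--                     t *= -1
--                 tokens2.append(str(t))
--             else:
--                 tokens2.append(tokens[i])
--             operand = False
--
--
--     # zdruzi vse sinuse.... v isti char
--     tokens3 = []
--     combine = False
--     for i in range(len(tokens2)):
--         if combine: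
--             combine = False
--             continue
--         if tokens2[i] in "scl":
--             pair = tokens2[i]+tokens2[i+1]
--             tokens3.append(pair)
--             combine = True
--
--         else:
--             tokens3.append(str(tokens2[i]))
--
--     return tokens3
-- ===== SOURCE B (Python) =====
-- def parse_equation1(string):
--     # One left-to-right scan over the normalized string: a 'negate' flag handles
--     # unary minus and a 'pending' function letter is joined with the next emitted
--     # token, so no intermediate token lists are built.
--     ns = string.replace(" ", "")
--     ns = ns.replace("**", "^")
--     ns = ns.replace("sin", "s")
--     ns = ns.replace("cos", "c")
--     ns = ns.replace("log", "l")
--     ns = ns.replace("^1", "")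
--     ns = ns.replace("/1", "")
--     ns = ns.replace("*1", "")
--
--     out = []
--     pending = None   # function letter waiting for its argument token
--     negate = False
--     prev = ""
--     for i, c in enumerate(ns):
--         if i == 0 and c == "-":
--             negate = True
--         elif i > 1 and prev in "*^-+/" and (c == "-" or c == "+"):
--             if c == "-":
--                 negate = True
--         else:
--             if c.isdigit():
--                 t = int(c)
--                 if negate:
--                     t = -t
--                 e = str(t)
--             else:
--                 e = c
--             if pending is not None:
--                 out.append(pending + e)
--                 pending = None
--             elif e in "scl":
--                 pending = e
--             else:
--                 out.append(e)
--             negate = False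
--         prev = c
--     return out
-- ===== Notes on version B (the rewrite author's own statement) =====
-- stated objective: alternative
-- what changed: Replaces A's four sequential passes (char-split list, head special-case, sign-merging pass into tokens2, function-letter pairing pass into tokens3) with a single left-to-right scan over the normalized string that maintains a negate flag and a pending function letter and emits final tokens directly, building no intermediate token lists.
-- outside the precondition, e.g. on parse_equation1('-'): A raises IndexError, B returns []
import Mathlib
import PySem

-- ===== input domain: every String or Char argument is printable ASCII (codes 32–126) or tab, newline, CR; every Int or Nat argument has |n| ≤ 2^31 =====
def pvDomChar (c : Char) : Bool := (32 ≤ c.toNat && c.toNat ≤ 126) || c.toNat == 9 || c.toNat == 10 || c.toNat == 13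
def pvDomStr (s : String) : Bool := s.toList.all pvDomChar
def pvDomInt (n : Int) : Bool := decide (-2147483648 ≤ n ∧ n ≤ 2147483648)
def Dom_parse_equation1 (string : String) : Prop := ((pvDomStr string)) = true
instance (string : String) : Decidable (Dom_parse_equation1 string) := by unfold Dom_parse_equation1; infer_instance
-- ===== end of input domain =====

-- B replaces A's four sequential passes with one left-to-right scan (negate flag +
-- pending function letter) that emits final tokens directly, building no intermediate
-- token lists (objective: alternative decomposition).


-- the shared .replace normalization chain of both Pythons
def pvNorm (s : String) : String :=
  let a := PySem.Str.replace s " " ""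
  let a := PySem.Str.replace a "**" "^"
  let a := PySem.Str.replace a "sin" "s"
  let a := PySem.Str.replace a "cos" "c"
  let a := PySem.Str.replace a "log" "l"
  let a := PySem.Str.replace a "^1" ""
  let a := PySem.Str.replace a "/1" ""
  PySem.Str.replace a "*1" ""

-- ===== PORT A =====
-- Everything after the replace chain runs over the normalized string's chars.
-- pyGetD defaults (' ', "") are reached only where the Python raises; Pre_ excludes those inputs.
-- body of A's second loop (sign merging), tokens2 state = (list, operand)
def pvABody2 (tokens : List Char) (st : List String × Bool) (i : Int) : List String × Bool :=
  let ci := PySem.List.pyGetD tokens i ' '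
  if i > 1 ∧ PySem.List.pyGetD tokens (i-1) ' ' ∈ ['*','^','-','+','/'] ∧ (ci = '-' ∨ ci = '+') then
    (st.1, if ci = '-' then true else st.2)
  else
    if PySem.Chars.isdigit ci then
      let t := (PySem.Int.ofStr? (String.ofList [ci])).getD 0
      let t := if st.2 then t * -1 else t
      (st.1 ++ [PySem.Int.toStr t], false)
    else
      (st.1 ++ [String.ofList [ci]], false)

-- body of A's third loop (function-letter pairing), state = (list, combine)
def pvABody3 (tokens2 : List String) (st : List String × Bool) (i : Int) : List String × Bool :=
  if st.2 then (st.1, false)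
  else
    let ei := PySem.List.pyGetD tokens2 i ""
    if PySem.Str.isIn ei "scl" then
      (st.1 ++ [ei ++ PySem.List.pyGetD tokens2 (i+1) ""], true)
    else
      (st.1 ++ [ei], false)

def pvAcs (cs : List Char) : List String :=
  let tokens : List Char := cs.foldl (fun acc c => acc ++ [c]) []
  let hd : (List String × Int) :=
    if PySem.List.pyGetD tokens 0 ' ' = '-' then
      ([PySem.Int.toStr (((PySem.Int.ofStr? (String.ofList [PySem.List.pyGetD tokens 1 ' '])).getD 0) * -1)], 2)
    else ([], 0)
  let st2 := (PySem.List.pyRange hd.2 (tokens.length : Int) 1).foldl (pvABody2 tokens) (hd.1, false)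
  let tokens2 := st2.1
  let st3 := (PySem.List.pyRange 0 (tokens2.length : Int) 1).foldl (pvABody3 tokens2) ([], false)
  st3.1

def parse_equation1 (string : String) : List String :=
  pvAcs (pvNorm string).toList

-- ===== PORT B =====
-- One scan over (index, char) pairs, state = (out, pending function letter, negate, prev char).
def pvBBody (st : List String × Option String × Bool × Char) (p : Int × Char) :
    List String × Option String × Bool × Char :=
  let out := st.1
  let pending := st.2.1
  let negate := st.2.2.1
  let prev := st.2.2.2
  let i := p.1
  let c := p.2
  if i = 0 ∧ c = '-' then
    (out, pending, true, c)
  else if i > 1 ∧ prev ∈ ['*','^','-','+','/'] ∧ (c = '-' ∨ c = '+') then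
    (out, pending, (if c = '-' then true else negate), c)
  else
    let e := if PySem.Chars.isdigit c then
        let t := (PySem.Int.ofStr? (String.ofList [c])).getD 0
        PySem.Int.toStr (if negate then -t else t)
      else String.ofList [c]
    match pending with
    | some q => (out ++ [q ++ e], none, false, c)
    | none =>
      if PySem.Str.isIn e "scl" then (out, some e, false, c)
      else (out ++ [e], none, false, c)

def pvBcs (cs : List Char) : List String :=
  ((PySem.List.enumerate cs 0).foldl pvBBody ([], none, false, ' ')).1

def parse_equation1_alt (string : String) : List String :=
  pvBcs (pvNorm string).toList

-- ===== PRECONDITION & SPEC =====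
-- Well-formedness scan for the function-letter pairing: tracks whether an s/c/l
-- token is still waiting for a following argument token when the string ends
-- (there is no simpler closed characterization of this condition).
def pvWf (i : Int) (prev : Char) (pending : Bool) : List Char → Bool
  | [] => !pending
  | c :: r =>
    if (i = 0 ∧ c = '-') ∨ (i > 1 ∧ prev ∈ ['*','^','-','+','/'] ∧ (c = '-' ∨ c = '+')) then
      pvWf (i+1) c pending r
    else
      pvWf (i+1) c (!pending && (c = 's' || c = 'c' || c = 'l')) r

-- Pre_ excludes exactly the inputs on which the Python A raises: an empty
-- normalized string (IndexError), a leading '-' not followed by a digit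
-- (IndexError/ValueError), or a dangling function letter s/c/l with no
-- following token to pair with (IndexError).
def Pre_parse_equation1 (string : String) : Prop :=
  let cs := (pvNorm string).toList
  cs ≠ [] ∧
  (cs.headD ' ' = '-' → 2 ≤ cs.length ∧ PySem.Chars.isdigit (cs.getD 1 ' ') = true) ∧
  pvWf 0 ' ' false cs = true
instance (string : String) : Decidable (Pre_parse_equation1 string) := by
  unfold Pre_parse_equation1; infer_instance

def pvWitness_parse_equation1 : String := "1+2*sin3"

def Spec_parse_equation1 (string : String) (out : List String) : Prop := out = parse_equation1_alt string
instance (string : String) (out : List String) : Decidable (Spec_parse_equation1 string out) := by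
  unfold Spec_parse_equation1; infer_instance

-- ===== CLAIM =====
def Claim_equal_parse_equation1 : Prop :=
  ∀ (string : String), Dom_parse_equation1 string → Pre_parse_equation1 string →
    Spec_parse_equation1 string (parse_equation1 string)

-- ===== LEMMAS AND PROOFS =====

-- digit value of a single character, as both Pythons compute it
def pvDval (c : Char) : Int := (PySem.Int.ofStr? (String.ofList [c])).getD 0

-- the token that loop 2 of A (and the emit step of B) produces for char c
def pvElem (neg : Bool) (c : Char) : String :=
  if PySem.Chars.isdigit c then PySem.Int.toStr (if neg then pvDval c * -1 else pvDval c)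
  else String.ofList [c]

-- the stream of tokens2 elements produced from position i on (prev = char at i-1)
def pvElems2 (i : Int) (prev : Char) (neg : Bool) : List Char → List String
  | [] => []
  | c :: r =>
    if i > 1 ∧ prev ∈ ['*','^','-','+','/'] ∧ (c = '-' ∨ c = '+') then
      pvElems2 (i+1) c (if c = '-' then true else neg) r
    else pvElem neg c :: pvElems2 (i+1) c false r

def pvScl (e : String) : Bool := PySem.Str.isIn e "scl"

-- offline version of A's pairing loop (loop 3)
def pvPair3 : List String → List String
  | [] => []
  | [x] => if pvScl x then [x ++ ""] else [x]
  | x :: y :: r => if pvScl x then (x ++ y) :: pvPair3 r else x :: pvPair3 (y :: r)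

-- B's online emit step over (out, pending)
def pvEstep (st : List String × Option String) (e : String) : List String × Option String :=
  match st.2 with
  | some q => (st.1 ++ [q ++ e], none)
  | none => if pvScl e then (st.1, some e) else (st.1 ++ [e], none)

-- no dangling function letter, given an initial pending flag
def pvBalP (p : Bool) : List String → Bool
  | [] => !p
  | x :: r => if p then pvBalP false r else pvBalP (pvScl x) r

theorem pv_foldl_append (cs : List Char) (acc : List Char) :
    cs.foldl (fun a c => a ++ [c]) acc = acc ++ cs := by
  induction cs generalizing acc with
  | nil => simp
  | cons c r ih => simp [List.foldl_cons, ih]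

theorem pv_digit_cases (c : Char) (h : PySem.Chars.isdigit c = true) :
    c ∈ ['0','1','2','3','4','5','6','7','8','9'] := by
  simp [PySem.Chars.isdigit, Char.le_def] at h
  obtain ⟨h1, h2⟩ := h
  have h1' : 48 ≤ c.toNat := by exact_mod_cast h1
  have h2' : c.toNat ≤ 57 := by exact_mod_cast h2
  have hc : Char.ofNat c.toNat = c := Char.ofNat_toNat c
  interval_cases h : c.toNat <;> subst hc <;> decide

theorem pv_scl_single (c : Char) :
    pvScl (String.ofList [c]) = (c = 's' || c = 'c' || c = 'l') := by
  unfold pvScl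
  cases hb : (c = 's' || c = 'c' || c = 'l') with
  | true =>
    simp only [Bool.or_eq_true, decide_eq_true_eq] at hb
    rcases hb with (rfl | rfl) | rfl <;> decide
  | false =>
    simp only [Bool.or_eq_false_iff, decide_eq_false_iff_not] at hb
    obtain ⟨⟨hs, hc2⟩, hl⟩ := hb
    rw [Bool.eq_false_iff]
    intro habs
    have h2 := (PySem.Str.isIn_iff_infix _ _).mp habs
    have htl : (String.ofList [c]).toList = [c] := by simp
    rw [htl] at h2
    have hmem : c ∈ "scl".toList := h2.sublist.mem (by simp)
    have hdec : "scl".toList = ['s','c','l'] := by decide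
    rw [hdec] at hmem
    simp at hmem
    tauto

theorem pv_digit_not_scl (c : Char) (h : PySem.Chars.isdigit c = true) :
    (c = 's' || c = 'c' || c = 'l') = false := by
  have := pv_digit_cases c h
  fin_cases this <;> decide

theorem pv_scl_elem (neg : Bool) (c : Char) :
    pvScl (pvElem neg c) = (c = 's' || c = 'c' || c = 'l') := by
  by_cases h : PySem.Chars.isdigit c = true
  · have hm := pv_digit_cases c h
    fin_cases hm <;> cases neg <;> decide
  · simp only [pvElem, h, if_false, Bool.false_eq_true]
    exact pv_scl_single c

theorem pv_elemB (neg : Bool) (c : Char) :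
    (if PySem.Chars.isdigit c then
        PySem.Int.toStr (if neg then -((PySem.Int.ofStr? (String.ofList [c])).getD 0)
                         else (PySem.Int.ofStr? (String.ofList [c])).getD 0)
      else String.ofList [c]) = pvElem neg c := by
  by_cases h : PySem.Chars.isdigit c <;> cases neg <;> simp [pvElem, pvDval, h]

theorem pvPair3_cons_not (x : String) (l : List String) (h : pvScl x = false) :
    pvPair3 (x :: l) = x :: pvPair3 l := by
  cases l <;> simp [pvPair3, h]

theorem pv_LA2 (cs : List Char) (n : Nat) : ∀ (k : Nat) (prev : Char) (acc : List String) (op : Bool),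
    k + n = cs.length → (2 ≤ k → cs.getD (k-1) ' ' = prev) →
    ((PySem.List.pyRange (k : Int) (cs.length : Int) 1).foldl (pvABody2 cs) (acc, op)).1
      = acc ++ pvElems2 (k : Int) prev op (cs.drop k) := by
  induction n with
  | zero =>
    intro k prev acc op hn hprev
    have hkeq : k = cs.length := by omega
    have hk : (cs.length : Int) ≤ (k : Int) := by exact_mod_cast Nat.le_of_eq hkeq.symm
    rw [PySem.List.pyRange_one_eq_nil hk, hkeq, List.drop_length]
    simp [pvElems2]
  | succ n ih =>
    intro k prev acc op hn hprev
    have hklt : k < cs.length := by omega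
    have hkI : (k : Int) < (cs.length : Int) := by exact_mod_cast hklt
    rw [PySem.List.pyRange_one_cons hkI, List.foldl_cons]
    have hdrop : cs.drop k = cs[k] :: cs.drop (k+1) := List.drop_eq_getElem_cons hklt
    have hci : PySem.List.pyGetD cs (k : Int) ' ' = cs[k] := by
      rw [PySem.List.pyGetD_natCast, List.getD_eq_getElem cs ' ' hklt]
    have hc1 : ((k : Int) + 1) = ((k + 1 : Nat) : Int) := by push_cast; ring
    have hprev1 : 2 ≤ k + 1 → cs.getD (k + 1 - 1) ' ' = cs[k] := by
      intro _
      simpa using List.getD_eq_getElem cs ' ' hklt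
    have hcondiff : ((k : Int) > 1 ∧ PySem.List.pyGetD cs ((k : Int)-1) ' ' ∈ ['*','^','-','+','/'] ∧ (cs[k] = '-' ∨ cs[k] = '+'))
        ↔ ((k : Int) > 1 ∧ prev ∈ ['*','^','-','+','/'] ∧ (cs[k] = '-' ∨ cs[k] = '+')) := by
      by_cases h2 : 2 ≤ k
      · have hm1 : ((k : Int) - 1) = ((k - 1 : Nat) : Int) := by
          have : 1 ≤ k := by omega
          push_cast [Nat.cast_sub this]; ring
        rw [hm1, PySem.List.pyGetD_natCast, hprev h2]
      · constructor <;> (rintro ⟨hgt, -, -⟩; exfalso)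
        · have : 2 ≤ k := by exact_mod_cast hgt
          omega
        · have : 2 ≤ k := by exact_mod_cast hgt
          omega
    rw [hdrop]
    by_cases hS : ((k : Int) > 1 ∧ prev ∈ ['*','^','-','+','/'] ∧ (cs[k] = '-' ∨ cs[k] = '+'))
    · have hbody : pvABody2 cs (acc, op) (k : Int) = (acc, if cs[k] = '-' then true else op) := by
        unfold pvABody2
        simp only [hci]
        rw [if_pos (hcondiff.mpr hS)]
      rw [hbody, pvElems2, if_pos hS, hc1]
      exact ih (k+1) cs[k] acc _ (by omega) hprev1
    · have hbody : pvABody2 cs (acc, op) (k : Int) = (acc ++ [pvElem op cs[k]], false) := by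
        unfold pvABody2
        simp only [hci]
        rw [if_neg (fun h => hS (hcondiff.mp h))]
        by_cases hdig : PySem.Chars.isdigit cs[k] = true <;> simp [pvElem, pvDval, hdig]
      rw [hbody, pvElems2, if_neg hS, hc1]
      rw [ih (k+1) cs[k] (acc ++ [pvElem op cs[k]]) false (by omega) hprev1]
      simp

theorem pv_LL3 (t2 : List String) (n : Nat) : ∀ (k : Nat) (acc : List String),
    k + n = t2.length →
    ((PySem.List.pyRange (k : Int) (t2.length : Int) 1).foldl (pvABody3 t2) (acc, false)).1
      = acc ++ pvPair3 (t2.drop k) := by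
  induction n using Nat.strong_induction_on with
  | _ n IH =>
    intro k acc hn
    match n, hn with
    | 0, hn =>
      have hkeq : k = t2.length := by omega
      have hk : (t2.length : Int) ≤ (k : Int) := by exact_mod_cast Nat.le_of_eq hkeq.symm
      rw [PySem.List.pyRange_one_eq_nil hk, hkeq, List.drop_length]
      simp [pvPair3]
    | (n' + 1), hn =>
      have hklt : k < t2.length := by omega
      have hkI : (k : Int) < (t2.length : Int) := by exact_mod_cast hklt
      rw [PySem.List.pyRange_one_cons hkI, List.foldl_cons]
      have hdrop : t2.drop k = t2[k] :: t2.drop (k+1) := List.drop_eq_getElem_cons hklt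
      have hek : PySem.List.pyGetD t2 (k : Int) "" = t2[k] := by
        rw [PySem.List.pyGetD_natCast, List.getD_eq_getElem t2 "" hklt]
      have hc1 : ((k : Int) + 1) = ((k + 1 : Nat) : Int) := by push_cast; ring
      rw [hdrop]
      by_cases hscl : pvScl t2[k] = true
      · have hbody : pvABody3 t2 (acc, false) (k : Int)
            = (acc ++ [t2[k] ++ PySem.List.pyGetD t2 ((k : Int) + 1) ""], true) := by
          unfold pvABody3
          simp only [hek]
          rw [if_neg (by simp), if_pos (by simpa [pvScl] using hscl)]
        rw [hbody]
        match n', hn with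
        | 0, hn =>
          have hk1 : k + 1 = t2.length := by omega
          have hk1' : (t2.length : Int) ≤ (k : Int) + 1 := by
            rw [hc1]; exact_mod_cast Nat.le_of_eq hk1.symm
          rw [PySem.List.pyRange_one_eq_nil hk1']
          have hgd : PySem.List.pyGetD t2 ((k : Int) + 1) "" = "" := by
            rw [hc1, PySem.List.pyGetD_natCast]
            exact List.getD_eq_default _ _ (by omega)
          have hdrop1 : t2.drop (k+1) = [] := by
            rw [hk1, List.drop_length]
          rw [hdrop1]
          simp [pvPair3, hscl, hgd]
        | (n'' + 1), hn =>
          have hk1lt : k + 1 < t2.length := by omega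
          have hk1I : ((k : Int) + 1) < (t2.length : Int) := by
            rw [hc1]; exact_mod_cast hk1lt
          rw [PySem.List.pyRange_one_cons hk1I, List.foldl_cons]
          have hgd : PySem.List.pyGetD t2 ((k : Int) + 1) "" = t2[k+1] := by
            rw [hc1, PySem.List.pyGetD_natCast, List.getD_eq_getElem t2 "" hk1lt]
          have hbody2 : pvABody3 t2 (acc ++ [t2[k] ++ PySem.List.pyGetD t2 ((k : Int) + 1) ""], true)
              ((k : Int) + 1) = (acc ++ [t2[k] ++ PySem.List.pyGetD t2 ((k : Int) + 1) ""], false) := by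
            unfold pvABody3
            rw [if_pos rfl]
          rw [hbody2]
          have hc2 : ((k : Int) + 1 + 1) = ((k + 2 : Nat) : Int) := by push_cast; ring
          rw [hc2]
          have hdrop2 : t2.drop (k+1) = t2[k+1] :: t2.drop (k+2) := List.drop_eq_getElem_cons hk1lt
          rw [IH n'' (by omega) (k+2) _ (by omega), hdrop2]
          rw [show pvPair3 (t2[k] :: t2[k+1] :: t2.drop (k+2))
                = (t2[k] ++ t2[k+1]) :: pvPair3 (t2.drop (k+2)) by
              simp [pvPair3, hscl]]
          simp [hgd]
      · rw [Bool.not_eq_true] at hscl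
        have hbody : pvABody3 t2 (acc, false) (k : Int) = (acc ++ [t2[k]], false) := by
          unfold pvABody3
          simp only [hek]
          rw [if_neg (by simp), if_neg (by simpa [pvScl] using Bool.eq_false_iff.mp hscl)]
        rw [hbody, hc1]
        rw [IH n' (by omega) (k+1) _ (by omega)]
        rw [pvPair3_cons_not _ _ hscl]
        simp

theorem pv_LL3_zero (t2 : List String) :
    ((PySem.List.pyRange 0 (t2.length : Int) 1).foldl (pvABody3 t2) ([], false)).1
      = pvPair3 t2 := by
  have h := pv_LL3 t2 t2.length 0 [] (by omega)
  simpa using h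

theorem pv_LB1 (rest : List Char) (i : Int) (prev : Char) (neg : Bool)
    (out : List String) (pending : Option String) (hi : 1 ≤ i) :
    ((PySem.List.enumerate rest i).foldl pvBBody (out, pending, neg, prev)).1
      = (List.foldl pvEstep (out, pending) (pvElems2 i prev neg rest)).1 := by
  induction rest generalizing i prev neg out pending with
  | nil => simp [PySem.List.enumerate_nil, pvElems2]
  | cons c r ih =>
    rw [PySem.List.enumerate_cons]
    simp only [List.foldl_cons]
    have hi0 : ¬ (i = 0 ∧ c = '-') := by rintro ⟨rfl, -⟩; omega
    by_cases hS : i > 1 ∧ prev ∈ ['*','^','-','+','/'] ∧ (c = '-' ∨ c = '+')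
    · rw [show pvBBody (out, pending, neg, prev) (i, c)
            = (out, pending, (if c = '-' then true else neg), c) by
          simp [pvBBody, hi0, hS]]
      rw [show pvElems2 i prev neg (c :: r)
            = pvElems2 (i+1) c (if c = '-' then true else neg) r by
          rw [pvElems2, if_pos hS]]
      exact ih (i+1) c _ out pending (by omega)
    · rw [show pvElems2 i prev neg (c :: r) = pvElem neg c :: pvElems2 (i+1) c false r by
          rw [pvElems2, if_neg hS]]
      rw [show pvBBody (out, pending, neg, prev) (i, c)
            = ((pvEstep (out, pending) (pvElem neg c)).1,
               (pvEstep (out, pending) (pvElem neg c)).2, false, c) by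
          simp only [pvBBody, hi0, hS, if_false]
          rw [pv_elemB neg c]
          cases pending with
          | some q => simp [pvEstep]
          | none =>
            cases h' : PySem.Chars.isIn (pvElem neg c).toList ['s', 'c', 'l'] <;>
              simp [pvEstep, pvScl, h']]
      rw [List.foldl_cons]
      exact ih (i+1) c false _ _ (by omega)

theorem pv_LM2 (l : List String) (out : List String) (h : pvBalP false l = true) :
    (List.foldl pvEstep (out, none) l).1 = out ++ pvPair3 l := by
  induction l using pvPair3.induct generalizing out with
  | case1 => simp [pvPair3]
  | case2 x hx =>
    have hx' : pvScl x = false := by simpa [pvBalP] using h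
    rw [hx] at hx'; cases hx'
  | case3 x hx =>
    rw [Bool.not_eq_true] at hx
    simp [pvPair3, pvEstep, hx]
  | case4 x y r hx ih =>
    have hb : pvBalP false r = true := by
      simpa [pvBalP, hx] using h
    rw [show pvPair3 (x :: y :: r) = (x ++ y) :: pvPair3 r by simp [pvPair3, hx]]
    simp only [List.foldl_cons]
    rw [show pvEstep (out, none) x = (out, some x) by simp [pvEstep, hx]]
    rw [show pvEstep (out, some x) y = (out ++ [x ++ y], none) by simp [pvEstep]]
    rw [ih _ hb]
    simp
  | case5 x y r hx ih =>
    rw [Bool.not_eq_true] at hx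
    have hb : pvBalP false (y :: r) = true := by
      simpa [pvBalP, hx] using h
    rw [pvPair3_cons_not x _ hx]
    rw [List.foldl_cons]
    rw [show pvEstep (out, none) x = (out ++ [x], none) by simp [pvEstep, hx]]
    rw [ih _ hb]
    simp

theorem pv_LW1 (rest : List Char) (i : Int) (prev : Char) (pending neg : Bool) (hi : 1 ≤ i) :
    pvBalP pending (pvElems2 i prev neg rest) = pvWf i prev pending rest := by
  induction rest generalizing i prev pending neg with
  | nil => simp [pvElems2, pvBalP, pvWf]
  | cons c r ih =>
    have hi0 : ¬ (i = 0 ∧ c = '-') := by rintro ⟨rfl, -⟩; omega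
    by_cases hS : i > 1 ∧ prev ∈ ['*','^','-','+','/'] ∧ (c = '-' ∨ c = '+')
    · rw [show pvWf i prev pending (c :: r) = pvWf (i+1) c pending r by
          rw [pvWf, if_pos (Or.inr hS)]]
      rw [show pvElems2 i prev neg (c :: r)
            = pvElems2 (i+1) c (if c = '-' then true else neg) r by
          rw [pvElems2, if_pos hS]]
      exact ih (i+1) c pending _ (by omega)
    · rw [show pvWf i prev pending (c :: r)
            = pvWf (i+1) c (!pending && (c = 's' || c = 'c' || c = 'l')) r by
          rw [pvWf, if_neg (not_or.mpr ⟨hi0, hS⟩)]]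
      rw [show pvElems2 i prev neg (c :: r) = pvElem neg c :: pvElems2 (i+1) c false r by
          rw [pvElems2, if_neg hS]]
      cases pending with
      | true =>
        rw [show pvBalP true (pvElem neg c :: pvElems2 (i+1) c false r)
              = pvBalP false (pvElems2 (i+1) c false r) by simp [pvBalP]]
        simpa using ih (i+1) c false false (by omega)
      | false =>
        rw [show pvBalP false (pvElem neg c :: pvElems2 (i+1) c false r)
              = pvBalP (pvScl (pvElem neg c)) (pvElems2 (i+1) c false r) by simp [pvBalP]]
        rw [pv_scl_elem]
        simpa using ih (i+1) c (c = 's' || c = 'c' || c = 'l') false (by omega)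

theorem pv_core (cs : List Char) (h1 : cs ≠ [])
    (h2 : cs.headD ' ' = '-' → 2 ≤ cs.length ∧ PySem.Chars.isdigit (cs.getD 1 ' ') = true)
    (h3 : pvWf 0 ' ' false cs = true) : pvAcs cs = pvBcs cs := by
  cases cs with
  | nil => exact absurd rfl h1
  | cons c0 rest =>
    by_cases hneg : c0 = '-'
    · subst hneg
      obtain ⟨hlen, hdig⟩ := h2 (by simp)
      cases rest with
      | nil => simp at hlen
      | cons c1 r =>
        have hdig1 : PySem.Chars.isdigit c1 = true := by simpa using hdig
        have hnscl : (c1 = 's' || c1 = 'c' || c1 = 'l') = false := pv_digit_not_scl c1 hdig1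
        have hsclel : pvScl (pvElem true c1) = false := by rw [pv_scl_elem, hnscl]
        -- A side
        have hA : pvAcs ('-' :: c1 :: r)
            = pvPair3 (pvElem true c1 :: pvElems2 2 c1 false r) := by
          unfold pvAcs
          simp only [pv_foldl_append, List.nil_append]
          rw [show PySem.List.pyGetD ('-' :: c1 :: r) 0 ' ' = '-' from PySem.List.pyGetD_zero_cons '-' _ ' ']
          rw [if_pos rfl]
          rw [show PySem.List.pyGetD ('-' :: c1 :: r) 1 ' ' = c1 by
            rw [show (1 : Int) = ((1 : Nat) : Int) by norm_num, PySem.List.pyGetD_natCast]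
            simp [List.getD]]
          rw [show (2 : Int) = ((2 : Nat) : Int) by norm_num]
          rw [pv_LA2 ('-' :: c1 :: r) r.length 2 c1 _ false
            (by simp only [List.length_cons]; omega) (by intro _; simp [List.getD])]
          rw [show ('-' :: c1 :: r).drop 2 = r from rfl]
          rw [show ((2 : Nat) : Int) = (2 : Int) by norm_num]
          rw [show PySem.Int.toStr (((PySem.Int.ofStr? (String.ofList [c1])).getD 0) * -1)
                = pvElem true c1 by simp [pvElem, pvDval, hdig1]]
          rw [List.singleton_append]
          rw [show (0 : Int) = ((0 : Nat) : Int) by norm_num]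
          rw [pv_LL3 (pvElem true c1 :: pvElems2 2 c1 false r)
                (pvElem true c1 :: pvElems2 2 c1 false r).length 0 [] (by omega)]
          rw [List.drop_zero, List.nil_append]
        -- B side
        have hB : pvBcs ('-' :: c1 :: r)
            = (List.foldl pvEstep ([], none) (pvElem true c1 :: pvElems2 2 c1 false r)).1 := by
          unfold pvBcs
          rw [PySem.List.enumerate_cons, PySem.List.enumerate_cons, List.foldl_cons, List.foldl_cons]
          rw [show pvBBody ([], none, false, ' ') (0, '-') = ([], none, true, '-') by
            unfold pvBBody
            rw [if_pos ⟨rfl, rfl⟩]]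
          rw [show pvBBody ([], none, true, '-') (0 + 1, c1) = ([pvElem true c1], none, false, c1) by
            unfold pvBBody
            rw [if_neg (by rintro ⟨h, -⟩; omega)]
            rw [if_neg (by rintro ⟨h, -⟩; omega)]
            have hscl2 : PySem.Chars.isIn (pvElem true c1).toList ['s', 'c', 'l'] = false := by
              simpa [pvScl] using hsclel
            simp [pvElem, pvDval, hdig1] at hscl2 ⊢
            simp [hscl2]]
          rw [pv_LB1 r (0 + 1 + 1) c1 false [pvElem true c1] none (by omega)]
          rw [show (0 + 1 + 1 : Int) = 2 by norm_num]
          rw [List.foldl_cons]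
          rw [show pvEstep ([], none) (pvElem true c1) = ([pvElem true c1], none) by
            simp [pvEstep, hsclel]]
        -- balance from h3
        have hbal : pvBalP false (pvElem true c1 :: pvElems2 2 c1 false r) = true := by
          rw [show pvBalP false (pvElem true c1 :: pvElems2 2 c1 false r)
                = pvBalP (pvScl (pvElem true c1)) (pvElems2 2 c1 false r) by simp [pvBalP]]
          rw [hsclel, pv_LW1 r 2 c1 false false (by omega)]
          rw [pvWf, if_pos (Or.inl ⟨rfl, rfl⟩)] at h3
          rw [pvWf, if_neg (by rintro (⟨h, -⟩ | ⟨h, -⟩) <;> omega)] at h3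
          rw [hnscl] at h3
          simpa using h3
        rw [hA, hB, pv_LM2 _ _ hbal, List.nil_append]
    · -- head is not '-'
      have hA : pvAcs (c0 :: rest) = pvPair3 (pvElems2 0 ' ' false (c0 :: rest)) := by
        unfold pvAcs
        simp only [pv_foldl_append, List.nil_append]
        rw [show PySem.List.pyGetD (c0 :: rest) 0 ' ' = c0 from PySem.List.pyGetD_zero_cons c0 _ ' ']
        rw [if_neg hneg]
        rw [show (0 : Int) = ((0 : Nat) : Int) by norm_num]
        rw [pv_LA2 (c0 :: rest) (c0 :: rest).length 0 ' ' [] false (by omega)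
          (fun h => absurd h (by omega))]
        rw [List.drop_zero, List.nil_append]
        rw [show ((0 : Nat) : Int) = (0 : Int) by norm_num]
        rw [pv_LL3_zero]
      have hst : pvElems2 0 ' ' false (c0 :: rest)
          = pvElem false c0 :: pvElems2 1 c0 false rest := by
        rw [pvElems2, if_neg (by rintro ⟨h, -⟩; omega)]
        norm_num
      have hB : pvBcs (c0 :: rest)
          = (List.foldl pvEstep ([], none) (pvElem false c0 :: pvElems2 1 c0 false rest)).1 := by
        unfold pvBcs
        rw [PySem.List.enumerate_cons, List.foldl_cons]
        rw [show pvBBody ([], none, false, ' ') (0, c0)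
              = ((pvEstep ([], none) (pvElem false c0)).1,
                 (pvEstep ([], none) (pvElem false c0)).2, false, c0) by
          unfold pvBBody
          rw [if_neg (by rintro ⟨-, h⟩; exact hneg h)]
          rw [if_neg (by rintro ⟨h, -⟩; omega)]
          rw [pv_elemB]
          cases h' : pvScl (pvElem false c0) with
          | true =>
            have h'' : PySem.Chars.isIn (pvElem false c0).toList ['s', 'c', 'l'] = true := by
              simpa [pvScl] using h'
            simp [pvEstep, h', h'']
          | false =>
            have h'' : PySem.Chars.isIn (pvElem false c0).toList ['s', 'c', 'l'] = false := by
              simpa [pvScl] using h'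
            simp [pvEstep, h', h'']]
        rw [pv_LB1 rest (0 + 1) c0 false _ _ (by omega)]
        rw [show (0 + 1 : Int) = 1 by norm_num, List.foldl_cons]
      have hbal : pvBalP false (pvElem false c0 :: pvElems2 1 c0 false rest) = true := by
        rw [show pvBalP false (pvElem false c0 :: pvElems2 1 c0 false rest)
              = pvBalP (pvScl (pvElem false c0)) (pvElems2 1 c0 false rest) by simp [pvBalP]]
        rw [pv_scl_elem, pv_LW1 rest 1 c0 _ false (by omega)]
        rw [pvWf, if_neg (by
          rintro (⟨-, h⟩ | ⟨h, -⟩)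
          · exact hneg h
          · omega)] at h3
        simpa using h3
      rw [hA, hst, hB, pv_LM2 _ _ hbal, List.nil_append]

-- ===== VERDICT =====
theorem parse_equation1_spec : Claim_equal_parse_equation1 := by
  intro s _ hpre
  unfold Spec_parse_equation1 parse_equation1 parse_equation1_alt
  simp only [Pre_parse_equation1] at hpre
  exact pv_core _ hpre.1 hpre.2.1 hpre.2.2
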